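-- pv_equiv track=rewrite | github.com/davdwan21/Silent-Speech | inactive/live_lower_half.py | expand_by_index_neighbors
-- ===== SOURCE A (Python) =====
-- def expand_by_index_neighbors(idx_set, k=1):
--     if k <= 0:
--         return set(idx_set)
--     out = set(idx_set)
--     for _ in range(k):
--         more = set()
--         for i in out:
--             for j in (i - 1, i + 1, i - 2, i + 2):
--                 if 0 <= j < 468:
--                     more.add(j)
--         out |= more
--     return out
-- ===== SOURCE B (Python) =====
-- def expand_by_index_neighbors(idx_set, k=1):
--     out = list(dict.fromkeys(idx_set))
--     frontier = out
--     rounds = k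
--     while rounds > 0 and frontier:
--         new = []
--         for i in frontier:
--             for j in (i - 1, i + 1, i - 2, i + 2):
--                 if 0 <= j < 468 and j not in out and j not in new:
--                     new.append(j)
--         out = out + new
--         frontier = new
--         rounds -= 1
--     return set(out)
-- ===== Notes on version B (the rewrite author's own statement) =====
-- stated objective: faster
-- what changed: A re-scans the entire accumulated set on each of its k rounds; B runs a frontier BFS: each round expands only the indices added in the previous round and the loop stops as soon as no new index appears, so the work is independent of k once the expansion saturates.
import Mathlib
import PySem

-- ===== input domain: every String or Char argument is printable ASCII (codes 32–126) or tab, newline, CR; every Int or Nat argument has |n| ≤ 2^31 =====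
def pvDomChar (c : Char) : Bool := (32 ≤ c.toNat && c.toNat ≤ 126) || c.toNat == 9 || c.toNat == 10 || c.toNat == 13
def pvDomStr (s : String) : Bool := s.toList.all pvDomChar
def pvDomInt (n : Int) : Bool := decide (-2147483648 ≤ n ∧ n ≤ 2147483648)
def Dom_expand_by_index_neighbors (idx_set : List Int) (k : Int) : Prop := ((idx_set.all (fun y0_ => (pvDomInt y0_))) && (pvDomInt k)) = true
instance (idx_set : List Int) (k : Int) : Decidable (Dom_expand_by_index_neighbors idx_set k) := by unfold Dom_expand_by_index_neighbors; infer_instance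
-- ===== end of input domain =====

-- B replaces A's k full rescans of the whole set by a BFS over the frontier (only the
-- newly added indices are expanded each round, stopping once nothing new appears):
-- measurably faster for large k / large sets; the return value is identical.

-- ===== PORT A =====
def expand_by_index_neighbors (idx_set : List Int) (k : Int) : List Int :=
  if k ≤ 0 then PySem.Set.ofList idx_set
  else
    (PySem.List.pyRange 0 k).foldl
      (fun out _ =>
        let more := out.foldl
          (fun more i =>
            [i - 1, i + 1, i - 2, i + 2].foldl
              (fun m j => if 0 ≤ j ∧ j < 468 then PySem.Set.add m j else m) more)
          PySem.Set.empty
        PySem.Set.union out more)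
      (PySem.Set.ofList idx_set)

-- ===== PORT B =====
-- the while-loop of Source B: `rounds` counts down, stopping early on an empty frontier
def pvBLoop (rounds : Nat) (out frontier : List Int) : List Int :=
  match rounds with
  | 0 => out
  | n + 1 =>
    if frontier = [] then out
    else
      let new := frontier.foldl
        (fun acc i =>
          [i - 1, i + 1, i - 2, i + 2].foldl
            (fun acc j => if 0 ≤ j ∧ j < 468 ∧ j ∉ out ∧ j ∉ acc then acc ++ [j] else acc)
            acc)
        []
      pvBLoop n (out ++ new) new

def expand_by_index_neighbors_alt (idx_set : List Int) (k : Int) : List Int :=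
  let out := PySem.List.dedup idx_set
  PySem.Set.ofList (pvBLoop k.toNat out out)

-- ===== PRECONDITION & SPEC =====
def Spec_expand_by_index_neighbors (idx_set : List Int) (k : Int) (out : List Int) : Prop := out = expand_by_index_neighbors_alt idx_set k
instance (idx_set : List Int) (k : Int) (out : List Int) : Decidable (Spec_expand_by_index_neighbors idx_set k out) := by unfold Spec_expand_by_index_neighbors; infer_instance

-- ===== CLAIM (what is proved, stated in full; the proofs are below) =====
def Claim_equal_expand_by_index_neighbors : Prop := ∀ (idx_set : List Int) (k : Int), Dom_expand_by_index_neighbors idx_set k → Spec_expand_by_index_neighbors idx_set k (expand_by_index_neighbors idx_set k)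

-- ===== LEMMAS AND PROOFS =====

-- in-range test 0 <= j < 468, candidate neighbours of a list, and the common
-- "append if new" fold both ports reduce to
def pvInR (j : Int) : Bool := decide (0 ≤ j ∧ j < 468)

def pvCand (l : List Int) : List Int :=
  l.flatMap (fun i => [i - 1, i + 1, i - 2, i + 2].filter pvInR)

def pvStep (out a : List Int) (j : Int) : List Int :=
  if j ∈ out ∨ j ∈ a then a else a ++ [j]

def pvPush (out a c : List Int) : List Int := c.foldl (pvStep out) a

-- one round of A, exactly the body of A's outer fold
def pvAstep (out : List Int) : List Int :=
  let more := out.foldl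
    (fun more i =>
      [i - 1, i + 1, i - 2, i + 2].foldl
        (fun m j => if 0 ≤ j ∧ j < 468 then PySem.Set.add m j else m) more)
    PySem.Set.empty
  PySem.Set.union out more

theorem pvPush_append (out a c₁ c₂ : List Int) :
    pvPush out a (c₁ ++ c₂) = pvPush out (pvPush out a c₁) c₂ :=
  List.foldl_append

theorem pvUpdate_append (m c₁ c₂ : List Int) :
    PySem.Set.update m (c₁ ++ c₂) = PySem.Set.update (PySem.Set.update m c₁) c₂ :=
  List.foldl_append

theorem pvFoldl_ext {α β : Type} (l : List α) (f g : β → α → β) (h : ∀ b x, f b x = g b x) :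
    ∀ b, l.foldl f b = l.foldl g b := by
  induction l with
  | nil => intro b; rfl
  | cons x l ih =>
    intro b
    rw [List.foldl_cons, List.foldl_cons, h]
    exact ih _

theorem pvUpdate_eq_push (c : List Int) : ∀ (out a : List Int),
    PySem.Set.update (out ++ a) c = out ++ pvPush out a c := by
  induction c with
  | nil => intro out a; rfl
  | cons j c ih =>
    intro out a
    have : PySem.Set.add (out ++ a) j = out ++ pvStep out a j := by
      simp [PySem.Set.add, PySem.Set.contains, pvStep]
      by_cases h : j ∈ out ∨ j ∈ a <;> simp [h]
    simp only [PySem.Set.update, List.foldl_cons] at *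
    rw [this, ih]
    rfl

theorem pvOfList_eq_push (c : List Int) : PySem.Set.ofList c = pvPush [] [] c := by
  have := pvUpdate_eq_push c [] []
  simpa [PySem.Set.ofList, PySem.Set.update, PySem.Set.empty] using this

theorem pvMem_push (c : List Int) : ∀ (out a : List Int) (j : Int),
    j ∈ a → j ∈ pvPush out a c := by
  induction c with
  | nil => intro out a j h; exact h
  | cons x c ih =>
    intro out a j h
    have hx : j ∈ pvStep out a x := by
      by_cases hc : x ∈ out ∨ x ∈ a <;> simp [pvStep, hc, h]
    exact ih out (pvStep out a x) j hx

theorem pvMem_of_mem_src (c : List Int) : ∀ (out a : List Int) (j : Int),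
    j ∈ c → j ∈ out ∨ j ∈ pvPush out a c := by
  induction c with
  | nil => intro out a j h; cases h
  | cons x c ih =>
    intro out a j h
    rcases List.mem_cons.mp h with rfl | hj
    · by_cases hx : j ∈ out
      · exact Or.inl hx
      · right
        have hx2 : j ∈ pvStep out a j := by
          by_cases ha : j ∈ a <;> simp [pvStep, hx, ha]
        exact pvMem_push c out (pvStep out a j) j hx2
    · exact ih out _ j hj

theorem pvPush_of_subset (c : List Int) : ∀ (out a : List Int),
    (∀ j ∈ c, j ∈ out) → pvPush out a c = a := by
  induction c with
  | nil => intro out a _; rfl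
  | cons x c ih =>
    intro out a h
    have hx : x ∈ out := h x (by simp)
    unfold pvPush
    simp only [List.foldl_cons]
    have : pvStep out a x = a := by simp [pvStep, hx]
    rw [this]
    exact ih out a (fun j hj => h j (by simp [hj]))

theorem pvPush_push (out : List Int) (c : List Int) : ∀ (s a : List Int),
    pvPush out a (pvPush [] s c) = pvPush out (pvPush out a s) c := by
  induction c with
  | nil => intro s a; rfl
  | cons j c ih =>
    intro s a
    have e1 : pvPush [] s (j :: c) = pvPush [] (pvStep [] s j) c := rfl
    have e2 : pvPush out (pvPush out a s) (j :: c)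
        = pvPush out (pvStep out (pvPush out a s) j) c := rfl
    rw [e1, e2]
    by_cases hj : j ∈ s
    · have h₁ : pvStep [] s j = s := by simp [pvStep, hj]
      have h₂ : pvStep out (pvPush out a s) j = pvPush out a s := by
        rcases pvMem_of_mem_src s out a j hj with h | h <;> simp [pvStep, h]
      rw [h₁, h₂]
      exact ih s a
    · have h₁ : pvStep [] s j = s ++ [j] := by simp [pvStep, hj]
      have h₃ : pvPush out a (s ++ [j]) = pvStep out (pvPush out a s) j := by
        rw [pvPush_append]; rfl
      rw [h₁, ← h₃]
      exact ih (s ++ [j]) a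
    
theorem pvNodup_push (c : List Int) : ∀ (out a : List Int),
    (out ++ a).Nodup → (out ++ pvPush out a c).Nodup := by
  induction c with
  | nil => intro out a h; exact h
  | cons j c ih =>
    intro out a h
    unfold pvPush
    simp only [List.foldl_cons]
    by_cases hj : j ∈ out ∨ j ∈ a
    · have : pvStep out a j = a := by simp [pvStep, hj]
      rw [this]; exact ih out a h
    · have hstep : pvStep out a j = a ++ [j] := by simp [pvStep, hj]
      rw [hstep]
      apply ih
      push_neg at hj
      rw [← List.append_assoc]
      rw [List.nodup_append]
      refine ⟨h, by simp, ?_⟩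
      intro x hx b hb
      simp at hb; subst hb
      rcases List.mem_append.mp hx with hx | hx
      · exact fun he => hj.1 (he ▸ hx)
      · exact fun he => hj.2 (he ▸ hx)

theorem pvPush_self (l : List Int) : ∀ (a : List Int),
    (a ++ l).Nodup → pvPush [] a l = a ++ l := by
  induction l with
  | nil => intro a _; simp [pvPush]
  | cons j l ih =>
    intro a h
    have hja : j ∉ a := by
      rw [List.nodup_append] at h
      intro hj; exact h.2.2 j hj j (by simp) rfl
    unfold pvPush
    simp only [List.foldl_cons]
    have : pvStep [] a j = a ++ [j] := by simp [pvStep, hja]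
    rw [this]
    have h' : ((a ++ [j]) ++ l).Nodup := by
      rw [List.append_assoc]; simpa using h
    have := ih (a ++ [j]) h'
    simpa [pvPush, List.append_assoc] using this

theorem pvOfList_nodup (l : List Int) (h : l.Nodup) : PySem.Set.ofList l = l := by
  rw [pvOfList_eq_push]
  simpa using pvPush_self l [] (by simpa using h)

-- A's inner fold over the four neighbours is an update by the in-range neighbours
theorem pvInnerA (c : List Int) : ∀ (m : List Int),
    c.foldl (fun m j => if 0 ≤ j ∧ j < 468 then PySem.Set.add m j else m) m
      = PySem.Set.update m (c.filter pvInR) := by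
  induction c with
  | nil => intro m; rfl
  | cons j c ih =>
    intro m
    by_cases h : 0 ≤ j ∧ j < 468 <;>
      simp [pvInR, h, ih, PySem.Set.update]

-- B's inner fold over the four neighbours is a pvPush by the in-range neighbours
theorem pvInnerB (c : List Int) : ∀ (out a : List Int),
    c.foldl (fun a j => if 0 ≤ j ∧ j < 468 ∧ j ∉ out ∧ j ∉ a then a ++ [j] else a) a
      = pvPush out a (c.filter pvInR) := by
  induction c with
  | nil => intro out a; rfl
  | cons j c ih =>
    intro out a
    rw [List.foldl_cons]
    by_cases h : 0 ≤ j ∧ j < 468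
    · have hfil : (j :: c).filter pvInR = j :: c.filter pvInR := by
        simp [pvInR, h]
      have hpp : pvPush out a (j :: c.filter pvInR)
          = pvPush out (pvStep out a j) (c.filter pvInR) := rfl
      rw [hfil, hpp]
      by_cases hm : j ∈ out ∨ j ∈ a
      · have hnc : ¬ (0 ≤ j ∧ j < 468 ∧ j ∉ out ∧ j ∉ a) := by tauto
        have hs : pvStep out a j = a := by simp [pvStep, hm]
        rw [if_neg hnc, hs]
        exact ih out a
      · push_neg at hm
        have hc : (0 ≤ j ∧ j < 468 ∧ j ∉ out ∧ j ∉ a) := ⟨h.1, h.2, hm.1, hm.2⟩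
        have hs : pvStep out a j = a ++ [j] := by simp [pvStep, hm.1, hm.2]
        rw [if_pos hc, hs]
        exact ih out (a ++ [j])
    · have hnc : ¬ (0 ≤ j ∧ j < 468 ∧ j ∉ out ∧ j ∉ a) := by tauto
      have hfil : (j :: c).filter pvInR = c.filter pvInR := by
        simp [pvInR, h]
      rw [if_neg hnc, hfil]
      exact ih out a

theorem pvOuterA (l : List Int) : ∀ (m : List Int),
    l.foldl (fun m i => PySem.Set.update m ([i - 1, i + 1, i - 2, i + 2].filter pvInR)) m
      = PySem.Set.update m (pvCand l) := by
  induction l with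
  | nil => intro m; rfl
  | cons i l ih =>
    intro m
    simp only [List.foldl_cons, pvCand, List.flatMap_cons, pvUpdate_append]
    simpa [pvCand] using ih (PySem.Set.update m ([i - 1, i + 1, i - 2, i + 2].filter pvInR))

theorem pvOuterB (l : List Int) : ∀ (out a : List Int),
    l.foldl (fun a i => pvPush out a ([i - 1, i + 1, i - 2, i + 2].filter pvInR)) a
      = pvPush out a (pvCand l) := by
  induction l with
  | nil => intro out a; rfl
  | cons i l ih =>
    intro out a
    simp only [List.foldl_cons, pvCand, List.flatMap_cons, pvPush_append]
    simpa [pvCand] using ih out (pvPush out a ([i - 1, i + 1, i - 2, i + 2].filter pvInR))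

theorem pvAstep_eq (out : List Int) :
    pvAstep out = out ++ pvPush out [] (pvCand out) := by
  unfold pvAstep
  simp only []
  have hmore : out.foldl
      (fun more i =>
        [i - 1, i + 1, i - 2, i + 2].foldl
          (fun m j => if 0 ≤ j ∧ j < 468 then PySem.Set.add m j else m) more)
      PySem.Set.empty = pvPush [] [] (pvCand out) := by
    have h1 : ∀ (m : List Int), out.foldl
        (fun more i =>
          [i - 1, i + 1, i - 2, i + 2].foldl
            (fun m j => if 0 ≤ j ∧ j < 468 then PySem.Set.add m j else m) more) m
        = PySem.Set.update m (pvCand out) := by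
      intro m
      rw [← pvOuterA]
      exact pvFoldl_ext out _ _ (fun b i => pvInnerA _ b) m
    rw [h1 PySem.Set.empty]
    show PySem.Set.update ([] ++ []) (pvCand out) = pvPush [] [] (pvCand out)
    rw [pvUpdate_eq_push]
    rfl
  rw [hmore]
  have hu : PySem.Set.union out (pvPush [] [] (pvCand out))
      = PySem.Set.update (out ++ []) (pvPush [] [] (pvCand out)) := by
    simp [PySem.Set.union]
  rw [hu, pvUpdate_eq_push]
  have := pvPush_push out (pvCand out) [] []
  simp only [pvPush] at this ⊢
  rw [this]
  rfl

-- B's per-round `new` list, normalised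
theorem pvBnew_eq (out frontier : List Int) :
    frontier.foldl
      (fun acc i =>
        [i - 1, i + 1, i - 2, i + 2].foldl
          (fun acc j => if 0 ≤ j ∧ j < 468 ∧ j ∉ out ∧ j ∉ acc then acc ++ [j] else acc)
          acc)
      [] = pvPush out [] (pvCand frontier) := by
  rw [← pvOuterB]
  exact pvFoldl_ext frontier _ _ (fun b i => pvInnerB _ out b) []

theorem pvCand_append (l₁ l₂ : List Int) : pvCand (l₁ ++ l₂) = pvCand l₁ ++ pvCand l₂ :=
  List.flatMap_append

-- once the set is closed under in-range neighbours, A's rounds do nothing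
theorem pvAstep_fixed (n : Nat) : ∀ (out : List Int),
    (∀ j ∈ pvCand out, j ∈ out) → pvAstep^[n] out = out := by
  induction n with
  | zero => intro out _; rfl
  | succ n ih =>
    intro out h
    rw [Function.iterate_succ_apply]
    have : pvAstep out = out := by
      rw [pvAstep_eq, pvPush_of_subset _ _ _ h, List.append_nil]
    rw [this]
    exact ih out h

-- main invariant: A's remaining rounds from `out` equal B's loop on (out, frontier)
theorem pvMain (n : Nat) : ∀ (out frontier prev : List Int),
    out = prev ++ frontier →
    (∀ j ∈ pvCand prev, j ∈ out) →
    out.Nodup →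
    pvAstep^[n] out = pvBLoop n out frontier ∧ (pvBLoop n out frontier).Nodup := by
  induction n with
  | zero => intro out frontier prev _ _ hnd; exact ⟨rfl, hnd⟩
  | succ n ih =>
    intro out frontier prev hsplit hclosed hnd
    by_cases hf : frontier = []
    · subst hf
      simp only [List.append_nil] at hsplit
      subst hsplit
      refine ⟨?_, by simpa [pvBLoop] using hnd⟩
      rw [pvAstep_fixed (n + 1) out hclosed]
      simp [pvBLoop]
    · have hb : pvBLoop (n + 1) out frontier
          = pvBLoop n (out ++ pvPush out [] (pvCand frontier)) (pvPush out [] (pvCand frontier)) := by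
        conv_lhs => rw [pvBLoop]
        rw [if_neg hf, pvBnew_eq]
      set N := pvPush out [] (pvCand frontier) with hN
      have hstep : pvAstep out = out ++ N := by
        rw [pvAstep_eq, hsplit, pvCand_append, ← hsplit, pvPush_append]
        rw [pvPush_of_subset _ out [] (fun j hj => hclosed j hj)]
      have hclosed' : ∀ j ∈ pvCand out, j ∈ out ++ N := by
        intro j hj
        rw [hsplit, pvCand_append, List.mem_append] at hj
        rcases hj with hj | hj
        · exact List.mem_append.mpr (Or.inl (hclosed j (by rw [hsplit] at *; exact hj)))
        · rcases pvMem_of_mem_src (pvCand frontier) out [] j hj with h | h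
          · exact List.mem_append.mpr (Or.inl h)
          · exact List.mem_append.mpr (Or.inr h)
      have hnd' : (out ++ N).Nodup := by
        have := pvNodup_push (pvCand frontier) out [] (by simpa using hnd)
        simpa [hN] using this
      have := ih (out ++ N) N out rfl hclosed' hnd'
      rw [Function.iterate_succ_apply, hstep, hb]
      exact this

-- foldl that ignores the list elements is function iteration
theorem pvFoldl_const {α β : Type} (l : List α) : ∀ (f : β → β) (b : β),
    l.foldl (fun b _ => f b) b = f^[l.length] b := by
  induction l with
  | nil => intro f b; rfl
  | cons x l ih =>
    intro f b
    simp only [List.foldl_cons, List.length_cons]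
    rw [ih, ← Function.iterate_succ_apply]

theorem pvLenRange (n : Nat) : ∀ (a : Int), (PySem.List.pyRange a (a + n)).length = n := by
  induction n with
  | zero =>
    intro a
    have : PySem.List.pyRange a (a + 0) = [] := by
      simp [PySem.List.pyRange]
    simp [this]
  | succ n ih =>
    intro a
    have : (a : Int) + (n + 1 : Nat) = (a + n) + 1 := by push_cast; ring
    rw [this, PySem.List.pyRange_one_succ_right (by omega)]
    simp [ih]

-- ===== VERDICT (by name: the statement is the Claim_ definition above) =====
theorem expand_by_index_neighbors_spec : Claim_equal_expand_by_index_neighbors := by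
  unfold Claim_equal_expand_by_index_neighbors
  intro idx_set k _
  unfold Spec_expand_by_index_neighbors
  unfold expand_by_index_neighbors expand_by_index_neighbors_alt
  by_cases hk : k ≤ 0
  · rw [if_pos hk]
    simp only [Int.toNat_of_nonpos hk, pvBLoop, PySem.List.dedup_eq_ofList]
    rw [pvOfList_nodup _ (PySem.Set.nodup_ofList idx_set)]
  · rw [if_neg hk]
    push_neg at hk
    set out0 := PySem.Set.ofList idx_set with hout0
    have hfold : (PySem.List.pyRange 0 k).foldl
        (fun out _ =>
          let more := out.foldl
            (fun more i =>
              [i - 1, i + 1, i - 2, i + 2].foldl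
                (fun m j => if 0 ≤ j ∧ j < 468 then PySem.Set.add m j else m) more)
            PySem.Set.empty
          PySem.Set.union out more) out0
        = pvAstep^[(PySem.List.pyRange 0 k).length] out0 :=
      pvFoldl_const _ pvAstep out0
    have hlen : (PySem.List.pyRange 0 k).length = k.toNat := by
      have := pvLenRange k.toNat 0
      rw [Int.toNat_of_nonneg (le_of_lt hk)] at this
      simpa using this
    have hmain := pvMain k.toNat out0 out0 [] (by simp)
      (by intro j hj; simp [pvCand] at hj) (PySem.Set.nodup_ofList idx_set)
    rw [hfold, hlen]
    rw [hmain.1, PySem.List.dedup_eq_ofList]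
    exact (pvOfList_nodup _ hmain.2).symm
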